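-- pv_equiv track=rewrite | github.com/eschaeffer17/advent-of-code | 2022/code/10-2.py | iterate_steps
-- ===== SOURCE A (Python) =====
-- def action(step):
--     if step.split(' ')[0]=='addx':
--         num_cycles=2
--         val=int(step.split(' ')[1])
--     else:
--         num_cycles=1
--         val=0
--     return num_cycles, val
--
-- def iterate_steps(aoc_input,starting_val):
--     i = 0
--     pos = 0
--     lst = []
--     while i<len(aoc_input):
--         num_cycles, val = action(aoc_input[i])
--         for j in range(num_cycles):
--             if starting_val-1<=pos<=starting_val+1:
--                 output = '#'
--             else:
--                 output = '.'
--             if pos==39: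
--                 pos=0
--             else:
--                 pos+=1
--             lst.append(output)
--         starting_val+=val
--         i+=1
--
--     return lst
-- ===== SOURCE B (Python) =====
-- def iterate_steps(aoc_input, starting_val):
--     # Phase 1: register value active in each individual cycle.
--     regs = []
--     for step in aoc_input:
--         parts = step.split(' ')
--         if parts[0] == 'addx':
--             regs += [starting_val, starting_val]
--             starting_val += int(parts[1])
--         else:
--             regs.append(starting_val)
--     # Phase 2: pixel for each cycle from its global index.
--     return ['#' if r - 1 <= i % 40 <= r + 1 else '.' for i, r in enumerate(regs)]
-- ===== Notes on version B (the rewrite author's own statement) =====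
-- stated objective: simpler
-- what changed: Replaces A's single stateful loop (manual pos counter with wrap-at-39 logic and an inner per-cycle loop) by two plain passes: build the per-cycle register list, then map each cycle index i to a pixel via i % 40.
import Mathlib
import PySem

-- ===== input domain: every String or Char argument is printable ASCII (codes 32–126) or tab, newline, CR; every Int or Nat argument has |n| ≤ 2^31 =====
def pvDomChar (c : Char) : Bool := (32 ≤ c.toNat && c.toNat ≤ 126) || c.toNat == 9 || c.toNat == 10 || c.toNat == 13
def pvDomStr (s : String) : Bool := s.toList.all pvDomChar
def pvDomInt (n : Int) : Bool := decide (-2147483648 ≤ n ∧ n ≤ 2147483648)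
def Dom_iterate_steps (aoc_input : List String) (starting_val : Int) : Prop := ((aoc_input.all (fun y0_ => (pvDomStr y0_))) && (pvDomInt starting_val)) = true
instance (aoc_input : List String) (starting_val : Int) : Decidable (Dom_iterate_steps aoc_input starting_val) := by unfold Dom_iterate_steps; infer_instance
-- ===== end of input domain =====

-- B replaces A's single stateful loop (manual pos counter with wrap-at-39 and an inner per-cycle loop)
-- by two plain passes: build the per-cycle register list, then map cycle index i to a pixel via i % 40.

-- shared builtin: step.split(' ') — PySem.Str.split? is none only for sep = "", so getD [] is exact
def pvParts (step : String) : List String := (PySem.Str.split? step " ").getD []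

-- ===== PORT A =====
-- action(step): int(...) is ported with PySem.Int.ofStr?; where Python raises
-- (missing token [1] or ValueError) the Option is none and Pre_ excludes the input.
def pvActionA (step : String) : Int × Int :=
  if (PySem.List.pyGet? (pvParts step) 0).getD "" = "addx" then
    (2, ((PySem.List.pyGet? (pvParts step) 1).bind PySem.Int.ofStr?).getD 0)
  else (1, 0)

def pvLoopA : List String → Int → Int → List String → List String
  | [], _, _, lst => lst
  | step :: rest, pos, sv, lst =>
    let nv := pvActionA step
    let st := (List.range nv.1.toNat).foldl
      (fun (pl : Int × List String) _ =>
        let output := if sv - 1 ≤ pl.1 ∧ pl.1 ≤ sv + 1 then "#" else "."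
        let p' := if pl.1 = 39 then (0 : Int) else pl.1 + 1
        (p', pl.2 ++ [output])) (pos, lst)
    pvLoopA rest st.1 (sv + nv.2) st.2

def iterate_steps (aoc_input : List String) (starting_val : Int) : List String :=
  pvLoopA aoc_input 0 starting_val []

-- ===== PORT B =====
def pvRegs : List String → Int → List Int
  | [], _ => []
  | step :: rest, sv =>
    let parts := pvParts step
    if (PySem.List.pyGet? parts 0).getD "" = "addx" then
      sv :: sv :: pvRegs rest (sv + ((PySem.List.pyGet? parts 1).bind PySem.Int.ofStr?).getD 0)
    else sv :: pvRegs rest sv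

def pvPix (ir : Int × Int) : String :=
  if ir.2 - 1 ≤ PySem.Int.mod ir.1 40 ∧ PySem.Int.mod ir.1 40 ≤ ir.2 + 1 then "#" else "."

def iterate_steps_alt (aoc_input : List String) (starting_val : Int) : List String :=
  (PySem.List.enumerate (pvRegs aoc_input starting_val)).map pvPix

-- ===== PRECONDITION & SPEC =====
-- Pre_ excludes exactly the inputs where Python A raises: a line whose first space-token
-- is 'addx' but which has no second token (IndexError) or whose second token is not a
-- valid int literal (ValueError). B raises there too.
def Pre_iterate_steps (aoc_input : List String) (_starting_val : Int) : Prop :=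
  ∀ step ∈ aoc_input,
    (PySem.List.pyGet? (pvParts step) 0).getD "" = "addx" →
    ((PySem.List.pyGet? (pvParts step) 1).bind PySem.Int.ofStr?).isSome = true
instance (aoc_input : List String) (starting_val : Int) : Decidable (Pre_iterate_steps aoc_input starting_val) := by unfold Pre_iterate_steps; infer_instance

def pvWitness_iterate_steps : List String × Int := (["addx 3", "noop", "addx -5"], 1)

def Spec_iterate_steps (aoc_input : List String) (starting_val : Int) (out : List String) : Prop := out = iterate_steps_alt aoc_input starting_val
instance (aoc_input : List String) (starting_val : Int) (out : List String) : Decidable (Spec_iterate_steps aoc_input starting_val out) := by unfold Spec_iterate_steps; infer_instance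

-- ===== CLAIM (what is proved, stated in full; the proofs are below) =====
def Claim_equal_iterate_steps : Prop := ∀ (aoc_input : List String) (starting_val : Int), Dom_iterate_steps aoc_input starting_val → Pre_iterate_steps aoc_input starting_val → Spec_iterate_steps aoc_input starting_val (iterate_steps aoc_input starting_val)

-- ===== LEMMAS AND PROOFS =====

lemma pvPosStep (n : Nat) :
    (if ((n % 40 : Nat) : Int) = 39 then (0 : Int) else ((n % 40 : Nat) : Int) + 1)
      = (((n + 1) % 40 : Nat) : Int) := by
  split_ifs with h <;> omega

lemma pvLoopA_eq (steps : List String) (n : Nat) (sv : Int) (lst : List String) :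
    pvLoopA steps ((n % 40 : Nat) : Int) sv lst
      = lst ++ (PySem.List.enumerate (pvRegs steps sv) (n : Int)).map pvPix := by
  induction steps generalizing n sv lst with
  | nil => simp [pvLoopA, pvRegs, PySem.List.enumerate_nil]
  | cons step rest ih =>
    simp only [pvLoopA, pvRegs, pvActionA]
    by_cases h : (PySem.List.pyGet? (pvParts step) 0).getD "" = "addx"
    · simp only [h, if_true]
      -- two cycles: List.range 2 = [0, 1]
      simp only [show (2:Int).toNat = 2 from rfl, show List.range 2 = [0, 1] from rfl,
        List.foldl_cons, List.foldl_nil]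
      rw [pvPosStep n]
      rw [pvPosStep (n + 1)]
      rw [ih (n + 2)]
      simp only [PySem.List.enumerate_cons, List.map_cons, pvPix, PySem.Int.mod_eq_emod_of_pos (b := 40) (by norm_num)]
      simp only [List.append_assoc, List.cons_append, List.nil_append]
      push_cast
      ring_nf
    · simp only [h, if_false]
      simp only [List.range, List.range.loop, List.foldl, Int.toNat_one]
      rw [pvPosStep n]
      rw [ih (n + 1)]
      simp only [PySem.List.enumerate_cons, List.map_cons, pvPix, PySem.Int.mod_eq_emod_of_pos (b := 40) (by norm_num)]
      simp only [List.append_assoc, List.cons_append, List.nil_append]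
      push_cast
      ring_nf

-- ===== VERDICT (by name: the statement is the Claim_ definition above) =====
theorem iterate_steps_spec : Claim_equal_iterate_steps := by
  intro aoc_input starting_val _ _
  unfold Spec_iterate_steps iterate_steps iterate_steps_alt
  have h := pvLoopA_eq aoc_input 0 starting_val []
  simpa using h
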